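-- pv_equiv track=rewrite | github.com/weixian-zhang/AlgosAmigos | src/DSA/Misc/Recursion/find_odd_numbers_22-7-2023/increment_row_of_nums.py | given_a_list_of_nums_generate_consecutive_nums
-- ===== SOURCE A (Python) =====
-- def given_a_list_of_nums_generate_consecutive_nums(nums: list[int], limit: int):
--
--     def recursion(idx: int, result: list[int], *args):
--
--         # base case
--         if idx > len(nums) - 1:
--             result.append(list(args))
--             return
--
--         for x in range(limit):
--             recursion(idx + 1, result, *args + (nums[idx] + x,))
--
--
--     result = []
--     recursion(0, result)
--     return result
-- ===== SOURCE B (Python) =====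
-- def given_a_list_of_nums_generate_consecutive_nums(nums: list[int], limit: int):
--     # Iterative back-to-front build: for each index (last first) prepend every
--     # value of its consecutive range to every already-built suffix combination.
--     result = [[]]
--     for n in reversed(nums):
--         result = [[x] + t for x in range(n, n + limit) for t in result]
--     return result
-- ===== Notes on version B (the rewrite author's own statement) =====
-- stated objective: alternative
-- what changed: Replaced the varargs recursion with per-call list appends by an iterative right-to-left fold that builds the Cartesian product of the per-index ranges back-to-front with a single accumulator list.
import Mathlib
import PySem

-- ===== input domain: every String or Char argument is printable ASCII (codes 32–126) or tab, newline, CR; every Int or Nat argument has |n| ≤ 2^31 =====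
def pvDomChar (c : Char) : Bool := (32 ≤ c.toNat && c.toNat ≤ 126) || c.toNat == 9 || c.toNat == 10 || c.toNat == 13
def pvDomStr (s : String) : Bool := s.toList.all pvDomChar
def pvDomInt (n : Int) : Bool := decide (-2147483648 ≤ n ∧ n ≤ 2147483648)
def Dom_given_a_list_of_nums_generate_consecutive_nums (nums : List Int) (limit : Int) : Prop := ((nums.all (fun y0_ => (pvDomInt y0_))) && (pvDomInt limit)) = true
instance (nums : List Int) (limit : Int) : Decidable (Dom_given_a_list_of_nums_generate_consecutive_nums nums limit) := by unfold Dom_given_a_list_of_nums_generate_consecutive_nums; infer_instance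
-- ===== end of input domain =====

-- ===== PORT A =====
-- B replaces A's varargs recursion by an iterative right-to-left fold building the product back-to-front (alternative decomposition, same cost).
-- helper: the inner 'recursion' of A (idx > len(nums)-1 ↔ nums.length ≤ idx since idx ≥ 0)
def pvRecA (nums : List Int) (limit : Int) (idx : Nat) (result : List (List Int)) (args : List Int) : List (List Int) :=
  if nums.length ≤ idx then result ++ [args]
  else (PySem.List.pyRange 0 limit 1).foldl
    (fun res x => pvRecA nums limit (idx + 1) res (args ++ [PySem.List.pyGetD nums (idx : Int) 0 + x])) result
termination_by nums.length - idx
decreasing_by omega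

def given_a_list_of_nums_generate_consecutive_nums (nums : List Int) (limit : Int) : List (List Int) :=
  pvRecA nums limit 0 [] []

-- ===== PORT B =====
def given_a_list_of_nums_generate_consecutive_nums_alt (nums : List Int) (limit : Int) : List (List Int) :=
  nums.reverse.foldl
    (fun result n => (PySem.List.pyRange n (n + limit) 1).flatMap (fun x => result.map (fun t => [x] ++ t)))
    [[]]
-- ===== PRECONDITION & SPEC =====
def Spec_given_a_list_of_nums_generate_consecutive_nums (nums : List Int) (limit : Int) (out : List (List Int)) : Prop := out = given_a_list_of_nums_generate_consecutive_nums_alt nums limit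
instance (nums : List Int) (limit : Int) (out : List (List Int)) : Decidable (Spec_given_a_list_of_nums_generate_consecutive_nums nums limit out) := by unfold Spec_given_a_list_of_nums_generate_consecutive_nums; infer_instance

-- ===== CLAIM (what is proved, stated in full; the proofs are below) =====
def Claim_equal_given_a_list_of_nums_generate_consecutive_nums : Prop := ∀ (nums : List Int) (limit : Int), Dom_given_a_list_of_nums_generate_consecutive_nums nums limit → Spec_given_a_list_of_nums_generate_consecutive_nums nums limit (given_a_list_of_nums_generate_consecutive_nums nums limit)

-- ===== LEMMAS AND PROOFS =====
lemma alt_nil (limit : Int) : given_a_list_of_nums_generate_consecutive_nums_alt [] limit = [[]] := rfl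

lemma alt_cons (a : Int) (rest : List Int) (limit : Int) :
    given_a_list_of_nums_generate_consecutive_nums_alt (a :: rest) limit =
      (PySem.List.pyRange a (a + limit) 1).flatMap
        (fun x => (given_a_list_of_nums_generate_consecutive_nums_alt rest limit).map (fun t => [x] ++ t)) := by
  unfold given_a_list_of_nums_generate_consecutive_nums_alt
  simp [List.foldl_append]

lemma recA_eq (nums : List Int) (limit : Int) :
    ∀ fuel idx result args, nums.length - idx = fuel →
      pvRecA nums limit idx result args =
        result ++ (given_a_list_of_nums_generate_consecutive_nums_alt (nums.drop idx) limit).map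
          (fun t => args ++ t) := by
  intro fuel
  induction fuel with
  | zero =>
    intro idx result args h
    have hle : nums.length ≤ idx := by omega
    rw [pvRecA, if_pos hle, List.drop_eq_nil_of_le hle, alt_nil]
    simp
  | succ m ih =>
    intro idx result args h
    have hlt : idx < nums.length := by omega
    have hdrop : nums.drop idx = nums[idx] :: nums.drop (idx + 1) :=
      (List.getElem_cons_drop hlt).symm
    rw [pvRecA, if_neg (by omega)]
    simp only [ih (idx + 1) _ _ (by omega)]
    rw [PySem.List.foldl_append_eq_flatMap]
    rw [hdrop, alt_cons]
    have hget : PySem.List.pyGetD nums (idx : Int) 0 = nums[idx] := by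
      simp [PySem.List.pyGetD_natCast, hlt]
    rw [hget]
    have hr : PySem.List.pyRange nums[idx] (nums[idx] + limit) 1 =
        (PySem.List.pyRange 0 limit 1).map (fun x => nums[idx] + x) := by
      rw [PySem.List.pyRange_one, PySem.List.pyRange_one]
      simp [List.map_map, Function.comp]
    rw [hr]
    simp [List.flatMap_map, List.map_map, Function.comp_def, List.map_flatMap]

-- ===== VERDICT (by name: the statement is the Claim_ definition above) =====
theorem given_a_list_of_nums_generate_consecutive_nums_spec : Claim_equal_given_a_list_of_nums_generate_consecutive_nums := by
  intro nums limit _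
  unfold Spec_given_a_list_of_nums_generate_consecutive_nums given_a_list_of_nums_generate_consecutive_nums
  rw [recA_eq nums limit (nums.length) 0 [] [] (by omega)]
  simp
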